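-- pv_equiv track=rewrite | github.com/YanshuHu/combinatorics-oj1 | permutations1.py | find_it_neg_4
-- ===== SOURCE A (Python) =====
-- def find_it_neg_4(new_list,index,value):
--     num = 0
--     lst = new_list[::-1]
--     for i in range(len(new_list)):
--         if lst[i] == -1:
--             num+=1
--             if num == index+1:
--                 lst[i] = value
--     a = lst[::-1]
--     return a
-- ===== SOURCE B (Python) =====
-- def find_it_neg_4(new_list, index, value):
--     positions = [i for i, x in enumerate(new_list) if x == -1]
--     out = list(new_list)
--     if 0 <= index < len(positions):
--         out[positions[len(positions) - 1 - index]] = value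
--     return out
-- ===== Notes on version B (the rewrite author's own statement) =====
-- stated objective: simpler
-- what changed: A reverses the list, scans the reversed copy with a running counter assigning in place at the (index+1)-th -1, and reverses back; B builds the list of -1 positions in one forward pass and performs a single direct assignment at positions[len(positions)-1-index] (no-op when index is out of that range), with no reversals.
import Mathlib
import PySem

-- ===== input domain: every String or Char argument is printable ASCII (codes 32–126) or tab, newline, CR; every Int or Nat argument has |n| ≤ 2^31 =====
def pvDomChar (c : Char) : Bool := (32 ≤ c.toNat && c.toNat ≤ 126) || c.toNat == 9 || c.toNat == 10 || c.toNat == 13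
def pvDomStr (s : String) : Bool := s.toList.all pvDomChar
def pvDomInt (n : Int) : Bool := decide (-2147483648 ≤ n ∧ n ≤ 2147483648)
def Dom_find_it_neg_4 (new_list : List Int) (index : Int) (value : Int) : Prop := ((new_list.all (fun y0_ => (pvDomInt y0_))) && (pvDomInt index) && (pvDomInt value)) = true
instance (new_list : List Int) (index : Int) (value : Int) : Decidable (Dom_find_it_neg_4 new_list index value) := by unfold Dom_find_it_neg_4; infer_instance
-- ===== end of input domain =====

-- B replaces A's reverse-scan-with-counter by a one-pass index table of the -1 positions and a single
-- direct assignment (objective: simpler). Neither program mutates its argument.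

-- ===== PORT A =====
-- literal port of A: reverse, loop over range(len) counting -1s, set lst[i] when num == index+1, reverse back.
-- lst[i] is always in range (0 ≤ i < len), so the total forms pyGetD/pySetD are exact here.
def find_it_neg_4 (new_list : List Int) (index : Int) (value : Int) : List Int :=
  let lst := (PySem.List.slice? new_list none none (-1)).getD []   -- new_list[::-1]
  let st := (PySem.List.pyRange 0 (new_list.length : Int) 1).foldl
    (fun (st : Int × List Int) i =>
      if PySem.List.pyGetD st.2 i 0 = -1 then
        if st.1 + 1 = index + 1 then (st.1 + 1, PySem.List.pySetD st.2 i value)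
        else (st.1 + 1, st.2)
      else st) (0, lst)
  (PySem.List.slice? st.2 none none (-1)).getD []                  -- lst[::-1]

-- ===== PORT B =====
-- literal port of B: positions = indices of -1 (one pass); copy; one assignment if 0 <= index < len(positions).
-- positions[len-1-index] is always in range there, so pyGetD/pySetD are exact here.
def find_it_neg_4_alt (new_list : List Int) (index : Int) (value : Int) : List Int :=
  let positions := (PySem.List.enumerate new_list 0).filterMap
    (fun p => if p.2 = -1 then some p.1 else none)
  if 0 ≤ index ∧ index < (positions.length : Int) then
    PySem.List.pySetD new_list
      (PySem.List.pyGetD positions ((positions.length : Int) - 1 - index) 0) value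
  else new_list

-- ===== PRECONDITION & SPEC =====
def Spec_find_it_neg_4 (new_list : List Int) (index : Int) (value : Int) (out : List Int) : Prop := out = find_it_neg_4_alt new_list index value
instance (new_list : List Int) (index : Int) (value : Int) (out : List Int) : Decidable (Spec_find_it_neg_4 new_list index value out) := by unfold Spec_find_it_neg_4; infer_instance

-- ===== CLAIM (what is proved, stated in full; the proofs are below) =====
def Claim_equal_find_it_neg_4 : Prop := ∀ (new_list : List Int) (index : Int) (value : Int), Dom_find_it_neg_4 new_list index value → Spec_find_it_neg_4 new_list index value (find_it_neg_4 new_list index value)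

-- ===== LEMMAS AND PROOFS =====

-- A's loop, as structural recursion with a countdown k = index - num: replace the element where k hits 0.
def replK (l : List Int) (k : Int) (v : Int) : List Int :=
  match l with
  | [] => []
  | x :: xs => if x = -1 then (if k = 0 then v :: xs else x :: replK xs (k-1) v)
               else x :: replK xs k v

-- indices of the -1 entries, in order
def pospos : List Int → List Nat
  | [] => []
  | x :: xs => if x = -1 then 0 :: (pospos xs).map (· + 1) else (pospos xs).map (· + 1)

lemma replK_of_neg (l : List Int) (k v : Int) (hk : k < 0) : replK l k v = l := by
  induction l generalizing k with
  | nil => rfl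
  | cons x xs ih =>
    simp only [replK]
    split_ifs with h1 h2
    · omega
    · rw [ih _ (by omega)]
    · rw [ih _ hk]

lemma length_pospos (l : List Int) : (pospos l).length = l.count (-1) := by
  induction l with
  | nil => rfl
  | cons x xs ih =>
    by_cases h : x = -1 <;>
      simp [pospos, h, List.count_cons, ih, Nat.add_comm]

lemma mem_pospos_lt (l : List Int) (p : Nat) (hp : p ∈ pospos l) : p < l.length := by
  induction l generalizing p with
  | nil => simp [pospos] at hp
  | cons x xs ih =>
    simp only [pospos] at hp
    split_ifs at hp with h
    · rcases List.mem_cons.mp hp with rfl | hp'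
      · simp
      · obtain ⟨q, hq, rfl⟩ := List.mem_map.mp hp'
        have := ih q hq
        simp only [List.length_cons]; omega
    · obtain ⟨q, hq, rfl⟩ := List.mem_map.mp hp
      have := ih q hq
      simp only [List.length_cons]; omega

lemma replK_of_big (l : List Int) (k v : Int) (hk : (l.count (-1) : Int) ≤ k) : replK l k v = l := by
  induction l generalizing k with
  | nil => rfl
  | cons x xs ih =>
    simp only [replK]
    have hc : (x :: xs).count (-1) = xs.count (-1) + (if x = -1 then 1 else 0) := by
      by_cases h : x = -1 <;> simp [List.count_cons, h]
    split_ifs with h1 h2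
    · rw [hc] at hk; simp [h1] at hk; omega
    · rw [hc] at hk; simp [h1] at hk
      rw [ih _ (by push_cast; omega)]
    · rw [hc] at hk; simp [h1] at hk
      rw [ih _ (by exact_mod_cast hk)]

lemma getD_map_succ (L : List Nat) (n : Nat) (hn : n < L.length) :
    (L.map (· + 1)).getD n 0 = L.getD n 0 + 1 := by
  rw [List.getD_eq_getElem _ _ (by simpa using hn), List.getD_eq_getElem _ _ hn, List.getElem_map]

lemma replK_of_in (l : List Int) (k : Int) (v : Int) (hk0 : 0 ≤ k)
    (hk : k.toNat < (pospos l).length) :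
    replK l k v = l.set ((pospos l).getD k.toNat 0) v := by
  induction l generalizing k with
  | nil => simp [pospos] at hk
  | cons x xs ih =>
    by_cases h : x = -1
    · rw [pospos, if_pos h] at hk ⊢
      simp only [replK]
      rw [if_pos h]
      by_cases h0 : k = 0
      · subst h0; simp
      · rw [if_neg h0]
        simp only [List.length_cons, List.length_map] at hk
        have hkn : (k-1).toNat < (pospos xs).length := by omega
        rw [ih (k-1) (by omega) hkn]
        rw [show k.toNat = (k-1).toNat + 1 by omega, List.getD_cons_succ,
          getD_map_succ _ _ hkn, List.set_cons_succ]
    · rw [pospos, if_neg h] at hk ⊢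
      simp only [replK]
      rw [if_neg h]
      simp only [List.length_map] at hk
      rw [ih k hk0 hk, getD_map_succ _ _ hk, List.set_cons_succ]

lemma pospos_append (a b : List Int) :
    pospos (a ++ b) = pospos a ++ (pospos b).map (· + a.length) := by
  induction a with
  | nil => simp [pospos]
  | cons x xs ih =>
    simp only [List.cons_append, pospos, ih]
    have hmm : ((pospos b).map (· + xs.length)).map (· + 1)
        = (pospos b).map (· + (x :: xs).length) := by
      rw [List.map_map]
      apply List.map_congr_left
      intro p _
      simp only [Function.comp_apply, List.length_cons]; omega
    by_cases h : x = -1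
    · rw [if_pos h, if_pos h, List.map_append, hmm]
      simp
    · rw [if_neg h, if_neg h, List.map_append, hmm]

lemma pospos_reverse (l : List Int) :
    pospos l.reverse = ((pospos l).reverse).map (fun p => l.length - 1 - p) := by
  induction l with
  | nil => simp [pospos]
  | cons x xs ih =>
    rw [List.reverse_cons, pospos_append, ih]
    have hx : pospos [x] = if x = -1 then [0] else [] := by
      by_cases h : x = -1 <;> simp [pospos, h]
    rw [hx]
    have hpart : ((pospos xs).reverse).map (fun p => xs.length - 1 - p)
        = (((pospos xs).map (· + 1)).reverse).map (fun p => (x :: xs).length - 1 - p) := by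
      rw [show ((pospos xs).map (· + 1)).reverse = ((pospos xs).reverse).map (· + 1) from List.map_reverse.symm, List.map_map]
      apply List.map_congr_left
      intro p hp
      have := mem_pospos_lt xs p (by simpa using hp)
      simp only [Function.comp_apply, List.length_cons]; omega
    by_cases h : x = -1
    · rw [if_pos h]
      simp only [pospos, if_pos h, List.reverse_cons, List.map_append, hpart]
      simp [List.length_reverse]
    · rw [if_neg h]
      simp only [pospos, if_neg h, hpart]
      simp

lemma enum_filterMap (l : List Int) (s : Int) :
    (PySem.List.enumerate l s).filterMap (fun p => if p.2 = -1 then some p.1 else none)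
      = (pospos l).map (fun n : Nat => s + (n : Int)) := by
  induction l generalizing s with
  | nil => simp [PySem.List.enumerate_nil, pospos]
  | cons x xs ih =>
    rw [PySem.List.enumerate_cons]
    simp only [List.filterMap_cons, pospos]
    by_cases h : x = -1
    · rw [if_pos h, if_pos h, ih]
      simp only [List.map_cons, List.map_map]
      congr 1
      · simp
      · apply List.map_congr_left; intro p _
        simp only [Function.comp_apply]; push_cast; ring
    · rw [if_neg h, if_neg h, ih]
      simp only [List.map_map]
      apply List.map_congr_left; intro p _
      simp only [Function.comp_apply]; push_cast; ring

lemma reverse_set (m : List Int) (j : Nat) (v : Int) (hj : j < m.length) :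
    (m.set j v).reverse = m.reverse.set (m.length - 1 - j) v := by
  apply List.ext_getElem
  · simp
  · intro i h1 h2
    simp only [List.length_reverse, List.length_set] at h1 h2
    rw [List.getElem_reverse, List.getElem_set, List.getElem_set, List.getElem_reverse]
    simp only [List.length_set]
    by_cases h : j = m.length - 1 - i
    · rw [if_pos h, if_pos (by omega)]
    · rw [if_neg h, if_neg (by omega)]

lemma replK_cons_neg1 (xs : List Int) (k v : Int) :
    replK ((-1 : Int) :: xs) k v = if k = 0 then v :: xs else -1 :: replK xs (k-1) v := by
  simp [replK]

lemma replK_cons_ne (x : Int) (h : ¬ x = -1) (xs : List Int) (k v : Int) :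
    replK (x :: xs) k v = x :: replK xs k v := by
  simp [replK, h]

-- A's loop as a fold over the index range equals replK on the suffix not yet scanned.
lemma loop_eq (index value : Int) (rest : List Int) :
    ∀ (done : List Int) (num : Int),
    (PySem.List.pyRange (done.length : Int) ((done.length : Int) + (rest.length : Int)) 1).foldl
      (fun (st : Int × List Int) i =>
        if PySem.List.pyGetD st.2 i 0 = -1 then
          if st.1 + 1 = index + 1 then (st.1 + 1, PySem.List.pySetD st.2 i value)
          else (st.1 + 1, st.2)
        else st) (num, done ++ rest)
    = (num + (rest.count (-1) : Int), done ++ replK rest (index - num) value) := by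
  induction rest with
  | nil =>
    intro done num
    rw [PySem.List.pyRange_one_eq_nil (by simp)]
    simp [replK]
  | cons x xs ih =>
    intro done num
    rw [PySem.List.pyRange_one_cons (by simp only [List.length_cons]; push_cast; omega),
      List.foldl_cons]
    have hget : PySem.List.pyGetD (done ++ x :: xs) (done.length : Int) 0 = x := by
      rw [PySem.List.pyGetD_natCast]
      simp [List.getD, List.getElem?_append_right (Nat.le_refl done.length)]
    have hset : PySem.List.pySetD (done ++ x :: xs) (done.length : Int) value
        = done ++ value :: xs := by
      rw [PySem.List.pySetD_natCast, List.set_append_right _ _ (Nat.le_refl done.length)]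
      simp
    by_cases h : x = -1
    · subst h
      rw [hget, if_pos rfl]
      by_cases hnum : num + 1 = index + 1
      · rw [if_pos hnum, hset,
          show ((done.length : Int) + 1) = (((done ++ [value]).length : Nat) : Int) by simp,
          show ((done.length : Int) + (((-1 : Int) :: xs).length : Int))
              = (((done ++ [value]).length : Nat) : Int) + ((xs.length : Nat) : Int) by
            simp only [List.length_append, List.length_cons, List.length_nil]; push_cast; ring,
          show done ++ value :: xs = (done ++ [value]) ++ xs by simp,
          ih (done ++ [value]) (num + 1), replK_of_neg xs _ _ (by omega),
          replK_cons_neg1, if_pos (show index - num = 0 by omega)]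
        simp only [Prod.mk.injEq]
        refine ⟨?_, by simp⟩
        simp only [List.count_cons]
        push_cast
        simp
        omega
      · rw [if_neg hnum,
          show ((done.length : Int) + 1) = (((done ++ [(-1 : Int)]).length : Nat) : Int) by simp,
          show ((done.length : Int) + (((-1 : Int) :: xs).length : Int))
              = (((done ++ [(-1 : Int)]).length : Nat) : Int) + ((xs.length : Nat) : Int) by
            simp only [List.length_append, List.length_cons, List.length_nil]; push_cast; ring,
          show done ++ (-1 : Int) :: xs = (done ++ [(-1 : Int)]) ++ xs by simp,
          ih (done ++ [(-1 : Int)]) (num + 1),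
          replK_cons_neg1, if_neg (show ¬ index - num = 0 by omega)]
        simp only [Prod.mk.injEq]
        refine ⟨?_, ?_⟩
        · simp only [List.count_cons]
          push_cast
          simp
          omega
        · simp [show index - (num + 1) = index - num - 1 by ring]
    · rw [hget, if_neg h,
        show ((done.length : Int) + 1) = (((done ++ [x]).length : Nat) : Int) by simp,
        show ((done.length : Int) + ((x :: xs).length : Int))
            = (((done ++ [x]).length : Nat) : Int) + ((xs.length : Nat) : Int) by
          simp only [List.length_append, List.length_cons, List.length_nil]; push_cast; ring,
        show done ++ x :: xs = (done ++ [x]) ++ xs by simp,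
        ih (done ++ [x]) num, replK_cons_ne x h]
      simp only [Prod.mk.injEq]
      refine ⟨?_, by simp⟩
      simp [List.count_cons, h]

lemma find_it_eq_replK (new_list : List Int) (index value : Int) :
    find_it_neg_4 new_list index value = (replK new_list.reverse index value).reverse := by
  have hl := loop_eq index value new_list.reverse [] 0
  simp only [List.nil_append, List.length_nil, Nat.cast_zero, zero_add, List.length_reverse,
    Int.sub_zero] at hl
  simp only [find_it_neg_4, PySem.List.slice?_none_none_neg_one, Option.getD_some]
  rw [hl]

-- ===== VERDICT (by name: the statement is the Claim_ definition above) =====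
theorem find_it_neg_4_spec : Claim_equal_find_it_neg_4 := by
  intro new_list index value _
  unfold Spec_find_it_neg_4
  rw [find_it_eq_replK]
  simp only [find_it_neg_4_alt]
  rw [enum_filterMap]
  simp only [List.length_map]
  set P := pospos new_list with hP
  by_cases hin : 0 ≤ index ∧ index < (P.length : Int)
  · rw [if_pos hin]
    obtain ⟨h0, h1⟩ := hin
    have hlenrev : (pospos new_list.reverse).length = P.length := by
      rw [pospos_reverse]; simp [hP]
    have htn : index.toNat < P.length := by omega
    rw [replK_of_in new_list.reverse index value h0 (by rw [hlenrev]; omega)]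
    have hq : (pospos new_list.reverse).getD index.toNat 0
        = new_list.length - 1 - P.getD (P.length - 1 - index.toNat) 0 := by
      rw [pospos_reverse]
      have hi : index.toNat < P.reverse.length := by simp [htn]
      rw [← hP, List.getD_eq_getElem _ _ (by simpa using hi), List.getElem_map,
        List.getElem_reverse]
      congr 1
      rw [List.getD_eq_getElem _ _ (by omega)]
    set p := P.getD (P.length - 1 - index.toNat) 0 with hp
    have hplen : P.length - 1 - index.toNat < P.length := by omega
    have hplt : p < new_list.length := by
      have hm : p ∈ P := by
        rw [hp, List.getD_eq_getElem _ _ hplen]; exact List.getElem_mem _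
      exact mem_pospos_lt _ _ hm
    rw [hq]
    rw [reverse_set _ _ _ (by simp only [List.length_reverse]; omega)]
    simp only [List.reverse_reverse, List.length_reverse]
    rw [show new_list.length - 1 - (new_list.length - 1 - p) = p by omega]
    rw [show (P.length : Int) - 1 - index = ((P.length - 1 - index.toNat : Nat) : Int) by omega]
    rw [PySem.List.pyGetD_natCast]
    have hrg : (P.map (fun n : Nat => (0 : Int) + (n : Int))).getD (P.length - 1 - index.toNat) 0
        = (p : Int) := by
      rw [List.getD_eq_getElem _ _ (by simpa using hplen), List.getElem_map]
      rw [hp, List.getD_eq_getElem _ _ hplen]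
      simp
    rw [hrg, PySem.List.pySetD_natCast]
  · rw [if_neg hin]
    have hrk : replK new_list.reverse index value = new_list.reverse := by
      rcases (not_and_or.mp hin) with h | h
      · exact replK_of_neg _ _ _ (by omega)
      · have hc : (new_list.reverse.count (-1) : Int) ≤ index := by
          rw [List.count_reverse]
          have hle : (P.length : Int) ≤ index := by omega
          rwa [hP, length_pospos] at hle
        exact replK_of_big _ _ _ hc
    rw [hrk, List.reverse_reverse]
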